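-- pv_equiv track=rewrite | github.com/CDBiddulph/gepa-legibility | data-generation/prepare_alliterate.py | filter_sentence
-- ===== SOURCE A (Python) =====
-- def filter_sentence(sentence):
--     """Check if a sentence is suitable for the task."""
--     # Filter by length (5-30 words)
--     words = sentence.strip().split()
--     if len(words) < 10 or len(words) > 30:
--         return False
--     # Check that every word starts with an English letter
--     if not all(word[0].isalpha() and word[0].isascii() for word in words):
--         return False
--     # Check that the first word starts with a capital English letter
--     if not (words[0][0].isupper() and words[0][0].isascii()):
--         return False
--     # Check that every word except the first word is lowercase (no proper nouns)
--     if not all(word.islower() for word in words[1:]):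
--         return False
--     return True
-- ===== SOURCE B (Python) =====
-- def _word_end_ok(count, ok, has_cased, has_upper):
--     """Flag update when a word ends: non-first words must satisfy str.islower()."""
--     if count > 1 and not (has_cased and not has_upper):
--         return False
--     return ok
--
--
-- def filter_sentence(sentence):
--     """Check if a sentence is suitable for the task.
--
--     Character-level state machine: one scan over the raw string, never
--     materializing the word list. Tracks the word count, whether we are inside
--     a word, and per-word case flags.
--     """
--     count = 0
--     ok = True
--     in_word = False
--     has_cased = False
--     has_upper = False
--     for ch in sentence:
--         if ch.isspace():
--             if in_word:
--                 ok = _word_end_ok(count, ok, has_cased, has_upper)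
--                 in_word = False
--         else:
--             if not in_word:
--                 in_word = True
--                 count += 1
--                 has_cased = False
--                 has_upper = False
--                 if not (ch.isalpha() and ch.isascii()):
--                     ok = False
--                 if count == 1 and not (ch.isupper() and ch.isascii()):
--                     ok = False
--             if ch.isupper() or ch.islower():
--                 has_cased = True
--             if ch.isupper():
--                 has_upper = True
--     if in_word:
--         ok = _word_end_ok(count, ok, has_cased, has_upper)
--     return ok and 10 <= count <= 30
-- ===== Notes on version B (the rewrite author's own statement) =====
-- stated objective: alternative
-- what changed: Replaces A's split()-then-four-passes (length check plus three whole-list scans with per-word string methods) by a single character-level state machine over the raw string that never builds a word list: it detects word boundaries itself and maintains a word count and per-word case flags in one scan.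
import Mathlib
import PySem

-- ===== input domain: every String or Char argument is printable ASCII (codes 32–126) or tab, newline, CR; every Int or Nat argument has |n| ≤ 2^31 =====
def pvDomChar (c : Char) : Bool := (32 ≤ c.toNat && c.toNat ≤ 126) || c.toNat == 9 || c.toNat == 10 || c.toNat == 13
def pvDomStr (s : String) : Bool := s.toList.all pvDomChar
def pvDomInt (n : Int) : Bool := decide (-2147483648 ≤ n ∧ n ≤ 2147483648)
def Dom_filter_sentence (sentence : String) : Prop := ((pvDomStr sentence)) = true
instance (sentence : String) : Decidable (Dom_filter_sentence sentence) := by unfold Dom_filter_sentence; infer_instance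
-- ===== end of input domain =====

-- B replaces A's split()-then-four-passes by a single character-level state machine over the
-- raw string that never builds the word list (objective: alternative; same asymptotic cost).


-- ===== PORT A =====
-- c.isascii(): codepoint < 128 (exact, hand-ported)
def pyIsAscii (c : Char) : Bool := decide (c.toNat < 128)

-- word.islower(): at least one cased character and no uppercase one; exact on the ASCII
-- domain (where the cased characters are exactly the upper/lower letters); hand-ported.
def pyStrIslower (cs : List Char) : Bool :=
  cs.any (fun c => PySem.Chars.islower c || PySem.Chars.isupper c) &&
  cs.all (fun c => !(PySem.Chars.isupper c))

-- word[0].isalpha() and word[0].isascii()  (pyGet? none = IndexError, unreachable: split() words are nonempty)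
def pvWordStartOk (w : List Char) : Bool :=
  match PySem.List.pyGet? w 0 with
  | some c => PySem.Chars.isalpha c && pyIsAscii c
  | none => false

def filter_sentence (sentence : String) : Bool :=
  let words := PySem.Chars.split₀ (PySem.Chars.strip sentence.toList)
  if words.length < 10 ∨ words.length > 30 then false
  else if !(words.all pvWordStartOk) then false
  else
    match PySem.List.pyGet? words 0 with
    | none => false   -- unreachable: words.length ≥ 10
    | some w0 =>
      match PySem.List.pyGet? w0 0 with
      | none => false -- unreachable
      | some c =>
        if !(PySem.Chars.isupper c && pyIsAscii c) then false
        else if !((PySem.List.slice words (some 1) none).all pyStrIslower) then false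
        else true

-- ===== PORT B =====
-- _word_end_ok of Source B
def pvWordEndOk (count : Nat) (ok hasCased hasUpper : Bool) : Bool :=
  if count > 1 && !(hasCased && !hasUpper) then false else ok

-- the body of Source B's `for ch in sentence` loop; state = (count, ok, in_word, has_cased, has_upper)
def pvStep (st : Nat × Bool × Bool × Bool × Bool) (c : Char) : Nat × Bool × Bool × Bool × Bool :=
  match st with
  | (count, ok, inWord, hasCased, hasUpper) =>
    if PySem.Chars.isspace c then
      if inWord then (count, pvWordEndOk count ok hasCased hasUpper, false, hasCased, hasUpper)
      else st
    else
      match (if !inWord then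
               let count' := count + 1
               let ok₁ := if !(PySem.Chars.isalpha c && pyIsAscii c) then false else ok
               let ok₂ := if count' == 1 && !(PySem.Chars.isupper c && pyIsAscii c) then false else ok₁
               (count', ok₂, (false : Bool), (false : Bool))
             else (count, ok, hasCased, hasUpper)) with
      | (count, ok, hc, hu) =>
        (count, ok, true,
         hc || (PySem.Chars.isupper c || PySem.Chars.islower c),
         hu || PySem.Chars.isupper c)

def filter_sentence_alt (sentence : String) : Bool :=
  match sentence.toList.foldl pvStep (0, true, false, false, false) with
  | (count, ok, inWord, hasCased, hasUpper) =>
    let ok := if inWord then pvWordEndOk count ok hasCased hasUpper else ok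
    ok && decide (10 ≤ count) && decide (count ≤ 30)

-- ===== PRECONDITION & SPEC =====
def Spec_filter_sentence (sentence : String) (out : Bool) : Prop := out = filter_sentence_alt sentence
instance (sentence : String) (out : Bool) : Decidable (Spec_filter_sentence sentence out) := by unfold Spec_filter_sentence; infer_instance

-- ===== CLAIM (what is proved, stated in full; the proofs are below) =====
def Claim_equal_filter_sentence : Prop := ∀ (sentence : String), Dom_filter_sentence sentence → Spec_filter_sentence sentence (filter_sentence sentence)

-- ===== LEMMAS AND PROOFS =====

-- the non-space predicate of a word character
def pvNS (c : Char) : Bool := !PySem.Chars.isspace c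

-- per-word checks, with `j` the number of words seen before this one
def pvCapOk (w : List Char) : Bool :=
  match w with
  | [] => false
  | c :: _ => PySem.Chars.isupper c && pyIsAscii c

def pvWordOk (j : Nat) (w : List Char) : Bool :=
  pvWordStartOk w && (if j = 0 then pvCapOk w else pyStrIslower w)

def pvCheckFrom (j : Nat) : List (List Char) → Bool
  | [] => true
  | w :: ws => pvWordOk j w && pvCheckFrom (j + 1) ws

-- "the flush check passes": && form of pvWordEndOk
def pvFlushC (count : Nat) (hc hu : Bool) : Bool :=
  !(decide (count > 1) && !(hc && !hu))

theorem pvWordEndOk_eq (count : Nat) (ok hc hu : Bool) :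
    pvWordEndOk count ok hc hu = (ok && pvFlushC count hc hu) := by
  unfold pvWordEndOk pvFlushC
  by_cases h : (decide (count > 1) && !(hc && !hu)) = true <;> simp [Bool.and_comm]

-- finalize: the post-loop flush plus the pair (count, ok) it returns
def pvFinish (st : Nat × Bool × Bool × Bool × Bool) : Nat × Bool :=
  match st with
  | (count, ok, inWord, hc, hu) =>
    (count, if inWord then pvWordEndOk count ok hc hu else ok)

-- ---- split₀.go structure lemmas ----
theorem pvGo_acc (cs : List Char) : ∀ (cur : List Char) (acc : List (List Char)),
    PySem.Chars.split₀.go cs cur acc = acc.reverse ++ PySem.Chars.split₀.go cs cur [] := by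
  induction cs with
  | nil =>
    intro cur acc
    by_cases h : cur.isEmpty = true <;> simp [PySem.Chars.split₀.go, h]
  | cons c cs ih =>
    intro cur acc
    by_cases hs : PySem.Chars.isspace c = true
    · by_cases h : cur.isEmpty = true
      · simp only [PySem.Chars.split₀.go, hs, h, if_true]
        exact ih [] acc
      · simp only [PySem.Chars.split₀.go, hs, h, if_true]
        rw [ih [] (cur.reverse :: acc), ih [] [cur.reverse]]
        simp
    · simp only [PySem.Chars.split₀.go, hs]
      exact ih (c :: cur) acc

theorem pvGo_cur (cs : List Char) : ∀ (cur : List Char), cur ≠ [] →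
    PySem.Chars.split₀.go cs cur []
      = (cur.reverse ++ cs.takeWhile pvNS) :: PySem.Chars.split₀.go (cs.dropWhile pvNS) [] [] := by
  induction cs with
  | nil =>
    intro cur h
    simp [PySem.Chars.split₀.go, List.isEmpty_iff, h]
  | cons c cs ih =>
    intro cur h
    by_cases hs : PySem.Chars.isspace c = true
    · have hns : pvNS c = false := by simp [pvNS, hs]
      simp only [PySem.Chars.split₀.go, hs, if_true, List.isEmpty_iff, h, if_false,
        List.takeWhile_cons, List.dropWhile_cons, hns]
      rw [pvGo_acc]
      simp [PySem.Chars.split₀.go, hs]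
    · have hns : pvNS c = true := by simp [pvNS, hs]
      simp only [PySem.Chars.split₀.go, hs, if_false, List.takeWhile_cons, List.dropWhile_cons, hns]
      rw [ih (c :: cur) (by simp)]
      simp

theorem pvSplit_space_cons {c : Char} (hs : PySem.Chars.isspace c = true) (cs : List Char) :
    PySem.Chars.split₀ (c :: cs) = PySem.Chars.split₀ cs := by
  simp [PySem.Chars.split₀, PySem.Chars.split₀.go, hs]

theorem pvSplit_word_cons {c : Char} (hs : PySem.Chars.isspace c = false) (cs : List Char) :
    PySem.Chars.split₀ (c :: cs)
      = (c :: cs.takeWhile pvNS) :: PySem.Chars.split₀ (cs.dropWhile pvNS) := by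
  simp only [PySem.Chars.split₀, PySem.Chars.split₀.go, hs, Bool.false_eq_true, if_false]
  rw [pvGo_cur cs [c] (by simp)]
  simp

-- split₀ ignores an all-space suffix
theorem pvGo_spaces (sp : List Char) (hsp : sp.all PySem.Chars.isspace = true) :
    ∀ (cur : List Char) (acc : List (List Char)),
      PySem.Chars.split₀.go sp cur acc = PySem.Chars.split₀.go [] cur acc := by
  induction sp with
  | nil => intro cur acc; rfl
  | cons c sp ih =>
    intro cur acc
    simp only [List.all_cons, Bool.and_eq_true] at hsp
    by_cases h : cur.isEmpty = true
    · simp only [PySem.Chars.split₀.go, hsp.1, if_true, h]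
      rw [ih hsp.2 [] acc]
      simp [PySem.Chars.split₀.go]
    · simp only [PySem.Chars.split₀.go, hsp.1, if_true, h]
      rw [ih hsp.2 [] (cur.reverse :: acc)]
      simp [PySem.Chars.split₀.go]

theorem pvGo_append_spaces (sp : List Char) (hsp : sp.all PySem.Chars.isspace = true)
    (u : List Char) : ∀ (cur : List Char) (acc : List (List Char)),
      PySem.Chars.split₀.go (u ++ sp) cur acc = PySem.Chars.split₀.go u cur acc := by
  induction u with
  | nil => intro cur acc; simpa using pvGo_spaces sp hsp cur acc
  | cons c u ih =>
    intro cur acc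
    by_cases hs : PySem.Chars.isspace c = true <;>
    by_cases h : cur.isEmpty = true <;>
      simp [PySem.Chars.split₀.go, hs, h, ih]

theorem pvSplit_strip (s : List Char) :
    PySem.Chars.split₀ (PySem.Chars.strip s) = PySem.Chars.split₀ s := by
  unfold PySem.Chars.strip
  -- rstrip: drop the all-space suffix
  have hr : ∀ t : List Char, PySem.Chars.split₀ (PySem.Chars.rstrip t) = PySem.Chars.split₀ t := by
    intro t
    have hdec : t = PySem.Chars.rstrip t ++ (t.reverse.takeWhile PySem.Chars.isspace).reverse := by
      unfold PySem.Chars.rstrip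
      conv_lhs => rw [← t.reverse_reverse, ← List.takeWhile_append_dropWhile
        (p := PySem.Chars.isspace) (l := t.reverse)]
      rw [List.reverse_append]
    have hsp : ((t.reverse.takeWhile PySem.Chars.isspace).reverse).all PySem.Chars.isspace = true := by
      simp only [List.all_reverse]
      exact List.all_eq_true.mpr (fun x hx => List.mem_takeWhile_imp hx)
    conv_rhs => rw [hdec]
    unfold PySem.Chars.split₀
    rw [pvGo_append_spaces _ hsp]
  rw [hr]
  -- lstrip: drop the all-space prefix
  induction s with
  | nil => rfl
  | cons c s ih =>
    by_cases hs : PySem.Chars.isspace c = true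
    · rw [pvSplit_space_cons hs]
      unfold PySem.Chars.lstrip at ih ⊢
      simpa [List.dropWhile_cons, hs] using ih
    · unfold PySem.Chars.lstrip
      simp [List.dropWhile_cons, hs]

-- cased / upper trackers over a word
def pvCased (c : Char) : Bool := PySem.Chars.isupper c || PySem.Chars.islower c

theorem pyStrIslower_eq (w : List Char) :
    pyStrIslower w = (w.any pvCased && !(w.any PySem.Chars.isupper)) := by
  unfold pyStrIslower pvCased
  rw [List.all_eq_not_any_not]
  congr 1
  · exact congrArg _ (funext fun c => Bool.or_comm _ _)
  · simp

-- ---- the scan lemma: Fresh (not in a word) and Mid (inside a word), by one induction ----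
theorem pvScan (cs : List Char) :
    (∀ (count : Nat) (ok hc hu : Bool),
      pvFinish (cs.foldl pvStep (count, ok, false, hc, hu))
        = (count + (PySem.Chars.split₀ cs).length,
           ok && pvCheckFrom count (PySem.Chars.split₀ cs))) ∧
    (∀ (count : Nat) (ok hc hu : Bool),
      pvFinish (cs.foldl pvStep (count, ok, true, hc, hu))
        = (count + (PySem.Chars.split₀ (cs.dropWhile pvNS)).length,
           ok && pvFlushC count (hc || (cs.takeWhile pvNS).any pvCased)
                              (hu || (cs.takeWhile pvNS).any PySem.Chars.isupper)
              && pvCheckFrom count (PySem.Chars.split₀ (cs.dropWhile pvNS)))) := by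
  induction cs with
  | nil =>
    constructor
    · intro count ok hc hu
      simp [pvFinish, PySem.Chars.split₀, PySem.Chars.split₀.go, pvCheckFrom]
    · intro count ok hc hu
      simp [pvFinish, PySem.Chars.split₀, PySem.Chars.split₀.go, pvCheckFrom,
        pvWordEndOk_eq]
  | cons c cs ih =>
    constructor
    · intro count ok hc hu
      by_cases hs : PySem.Chars.isspace c = true
      · rw [pvSplit_space_cons hs]
        simpa [pvStep, hs] using ih.1 count ok hc hu
      · have hsf : PySem.Chars.isspace c = false := Bool.eq_false_iff.mpr hs
        rw [pvSplit_word_cons hsf]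
        have hstep : pvStep (count, ok, false, hc, hu) c
            = (count + 1,
               (if !(PySem.Chars.isalpha c && pyIsAscii c) then false else ok) &&
                 (!(decide (count = 0)) || (PySem.Chars.isupper c && pyIsAscii c)),
               true, pvCased c, PySem.Chars.isupper c) := by
          simp only [pvStep, hsf, Bool.false_eq_true, if_false, Bool.not_false, if_true, pvCased]
          by_cases h0 : count = 0
          · subst h0
            cases hcap : (PySem.Chars.isupper c && pyIsAscii c) <;>
            cases ha : (PySem.Chars.isalpha c && pyIsAscii c) <;>
              simp [hcap, ha]
          · have he : (count + 1 == 1) = false := by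
              simp; omega
            simp [he, h0]
        rw [List.foldl_cons, hstep, (ih.2) (count + 1) _ (pvCased c) (PySem.Chars.isupper c)]
        simp only [Prod.mk.injEq]
        refine ⟨by simp only [List.length_cons]; omega, ?_⟩
        simp only [pvCheckFrom, pvWordOk, pvWordStartOk, PySem.List.pyGet?_zero_cons,
          pvCapOk, pvFlushC, pyStrIslower_eq, List.any_cons, pvCased]
        by_cases h0 : count = 0
        · subst h0
          have hng : ¬ (0 + 1 > 1) := by omega
          simp only [hng, decide_false, Bool.false_and, Bool.not_false, decide_true,
            Bool.not_true, Bool.false_or, if_pos rfl, Bool.true_and]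
          cases ha : (PySem.Chars.isalpha c && pyIsAscii c) <;>
          cases hcap : (PySem.Chars.isupper c && pyIsAscii c) <;>
            simp [ha, hcap]
        · have h1 : (count + 1 > 1) := by omega
          simp only [h0, decide_false, Bool.not_false, Bool.or_true, Bool.and_true,
            if_neg h0, h1, decide_true, Bool.true_and]
          cases ha : (PySem.Chars.isalpha c && pyIsAscii c) <;>
          cases hu1 : PySem.Chars.isupper c <;>
          cases hl1 : PySem.Chars.islower c <;>
            simp [ha, hu1, hl1, Bool.and_assoc, Bool.and_comm, Bool.and_left_comm]
    · intro count ok hc hu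
      by_cases hs : PySem.Chars.isspace c = true
      · have hns : pvNS c = false := by simp [pvNS, hs]
        have hstep : pvStep (count, ok, true, hc, hu) c
            = (count, pvWordEndOk count ok hc hu, false, hc, hu) := by
          simp [pvStep, hs]
        rw [List.foldl_cons, hstep, (ih.1) count _ hc hu,
          List.takeWhile_cons_of_neg (by simp [hns]),
          List.dropWhile_cons_of_neg (by simp [hns]),
          pvSplit_space_cons hs, pvWordEndOk_eq]
        simp [Bool.and_assoc]
      · have hns : pvNS c = true := by simp [pvNS, hs]
        have hstep : pvStep (count, ok, true, hc, hu) c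
            = (count, ok, true, hc || pvCased c, hu || PySem.Chars.isupper c) := by
          simp [pvStep, hs, pvCased]
        rw [List.foldl_cons, hstep, (ih.2) count ok _ _,
          List.takeWhile_cons_of_pos (by simp [hns]),
          List.dropWhile_cons_of_pos (by simp [hns])]
        simp [List.any_cons, Bool.or_assoc, pvCased]

-- pvCheckFrom from a nonzero start is an `all`
theorem pvCheckFrom_pos (ws : List (List Char)) :
    ∀ (j : Nat), j ≠ 0 →
      pvCheckFrom j ws = ws.all (fun w => pvWordStartOk w && pyStrIslower w) := by
  induction ws with
  | nil => intro j _; rfl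
  | cons w ws ih =>
    intro j hj
    simp only [pvCheckFrom, pvWordOk, hj, if_false, List.all_cons, ih (j + 1) (by omega)]

theorem pv_all_and (ws : List (List Char)) :
    ws.all (fun w => pvWordStartOk w && pyStrIslower w)
      = (ws.all pvWordStartOk && ws.all pyStrIslower) := by
  induction ws with
  | nil => rfl
  | cons a l ih =>
    simp only [List.all_cons, ih]
    cases pvWordStartOk a <;> cases pyStrIslower a <;> simp

-- A's body after the length guard, on a nonempty word list, is pvCheckFrom 0
theorem pvBody (w0 : List Char) (rest : List (List Char)) :
    (if !((w0 :: rest).all pvWordStartOk) then false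
     else
       match PySem.List.pyGet? (w0 :: rest) 0 with
       | none => false
       | some w =>
         match PySem.List.pyGet? w 0 with
         | none => false
         | some c =>
           if !(PySem.Chars.isupper c && pyIsAscii c) then false
           else if !((PySem.List.slice (w0 :: rest) (some 1) none).all pyStrIslower) then false
           else true)
    = pvCheckFrom 0 (w0 :: rest) := by
  have h0 : PySem.List.pyGet? (w0 :: rest) 0 = some w0 := by
    simp [PySem.List.pyGet?, PySem.List.pyIdx?]
  have hslice : PySem.List.slice (w0 :: rest) (some 1) none = rest := by
    simp [pysem]
  simp only [pvCheckFrom, pvWordOk, if_pos rfl, h0, hslice,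
    pvCheckFrom_pos rest 1 (by omega), pv_all_and, List.all_cons]
  cases hw : PySem.List.pyGet? w0 0 with
  | none =>
    have hst : pvWordStartOk w0 = false := by simp [pvWordStartOk, hw]
    simp [hst]
  | some c =>
    have hst : pvWordStartOk w0 = (PySem.Chars.isalpha c && pyIsAscii c) := by
      simp [pvWordStartOk, hw]
    have hcap : pvCapOk w0 = (PySem.Chars.isupper c && pyIsAscii c) := by
      cases w0 with
      | nil => simp [PySem.List.pyGet?, PySem.List.pyIdx?] at hw
      | cons d w =>
        have hd : d = c := by
          have := h0
          simp [PySem.List.pyGet?, PySem.List.pyIdx?] at hw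
          exact hw
        simp [pvCapOk, hd]
    rw [hst, hcap]
    cases ha : (PySem.Chars.isalpha c && pyIsAscii c) <;>
    cases hcp : (PySem.Chars.isupper c && pyIsAscii c) <;>
    cases hr1 : rest.all pvWordStartOk <;>
    cases hr2 : rest.all pyStrIslower <;>
      simp [ha, hcp, hr1, hr2]

theorem filter_sentence_eq (sentence : String) :
    filter_sentence sentence = filter_sentence_alt sentence := by
  simp only [filter_sentence, filter_sentence_alt]
  rw [pvSplit_strip]
  have hscan := (pvScan sentence.toList).1 0 true false false
  rcases hfold : sentence.toList.foldl pvStep (0, true, false, false, false) with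
    ⟨count, ok, inw, hc, hu⟩
  rw [hfold] at hscan
  simp only [pvFinish, Bool.true_and, Prod.mk.injEq, Nat.zero_add] at hscan
  obtain ⟨hcount, hok⟩ := hscan
  by_cases hlen : (PySem.Chars.split₀ sentence.toList).length < 10 ∨
      (PySem.Chars.split₀ sentence.toList).length > 30
  · rw [if_pos hlen]
    rcases hlen with hlen | hlen
    · have hd : decide (10 ≤ count) = false := by rw [hcount]; simp; omega
      simp [hd]
    · have hd : decide (count ≤ 30) = false := by rw [hcount]; simp; omega
      simp [hd]
  · rw [if_neg hlen]
    rw [not_or] at hlen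
    obtain ⟨hl1, hl2⟩ := hlen
    have hlen : 10 ≤ (PySem.Chars.split₀ sentence.toList).length ∧ (PySem.Chars.split₀ sentence.toList).length ≤ 30 := by omega
    have h10 : decide (10 ≤ count) = true := by rw [hcount]; simp; omega
    have h30 : decide (count ≤ 30) = true := by rw [hcount]; simp; omega
    rw [hok, h10, h30, Bool.and_true, Bool.and_true]
    rcases hwcons : PySem.Chars.split₀ sentence.toList with _ | ⟨w0, rest⟩
    · rw [hwcons] at hlen; simp at hlen
    · exact pvBody w0 rest

-- ===== VERDICT (by name: the statement is the Claim_ definition above) =====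
theorem filter_sentence_spec : Claim_equal_filter_sentence := by
  intro s _
  unfold Spec_filter_sentence
  exact filter_sentence_eq s
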